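-- pv_equiv track=rewrite | github.com/Nidhin-Nelson/python_projects | 1_CSV_Report.py | spend_on_count
-- ===== SOURCE A (Python) =====
-- def spend_on_count(the_list):
--     food=transport=entertainment=shopping=health=utilities=software=0
--     for row in the_list:
--         cat = row['Category'].upper()
--         if cat == 'FOOD':
--             food += 1
--         elif cat == 'TRANSPORT':
--             transport += 1
--         elif cat == 'ENTERTAINMENT':
--             entertainment += 1
--         elif cat == 'SHOPPING':
--             shopping += 1
--         elif cat == 'HEALTH':
--             health += 1
--         elif cat == 'UTILITIES':
--             utilities += 1
--         elif cat == 'SOFTWARE':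
--             software += 1
--
--     result={
--         'Food':food,
--         'Transport':transport,
--         'Entertainment':entertainment,
--         'Shopping':shopping,
--         'Health':health,
--         'Utilities':utilities,
--         'Software':software
--     }
--     sorted_amount=sorted(result.items(),key=lambda x:x[1], reverse=True)
--     return sorted_amount
-- ===== SOURCE B (Python) =====
-- def spend_on_count(the_list):
--     cats = [('Food', 'FOOD'), ('Transport', 'TRANSPORT'),
--             ('Entertainment', 'ENTERTAINMENT'), ('Shopping', 'SHOPPING'),
--             ('Health', 'HEALTH'), ('Utilities', 'UTILITIES'),
--             ('Software', 'SOFTWARE')]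
--     result = {name: sum(1 for row in the_list if row['Category'].upper() == key)
--               for name, key in cats}
--     return sorted(result.items(), key=lambda x: x[1], reverse=True)
-- ===== Notes on version B (the rewrite author's own statement) =====
-- stated objective: alternative
-- what changed: Replaces the single-pass seven-way if/elif dispatch over seven scalar counters with a table of (display name, uppercase key) pairs and one full scan of the list per category via a dict comprehension with sum(); same stable reverse sort by count.
import Mathlib
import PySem

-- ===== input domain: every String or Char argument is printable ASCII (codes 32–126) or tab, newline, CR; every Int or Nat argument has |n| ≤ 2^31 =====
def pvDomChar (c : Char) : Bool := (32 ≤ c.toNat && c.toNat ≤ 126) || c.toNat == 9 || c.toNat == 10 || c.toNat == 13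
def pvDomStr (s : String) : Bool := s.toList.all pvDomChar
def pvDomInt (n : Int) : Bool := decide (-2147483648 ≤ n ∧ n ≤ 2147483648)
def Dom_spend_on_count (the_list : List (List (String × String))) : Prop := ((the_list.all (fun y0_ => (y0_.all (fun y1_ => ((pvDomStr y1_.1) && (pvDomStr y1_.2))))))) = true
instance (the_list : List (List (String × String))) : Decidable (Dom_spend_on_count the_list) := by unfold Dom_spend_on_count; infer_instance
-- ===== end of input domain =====

-- B replaces A's single-pass seven-way if/elif dispatch by a category table and one
-- filtering scan per category (objective: alternative decomposition, same result).

-- row['Category'].upper(); '' is a dummy outside Pre_ (Python raises KeyError there)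
def pvCatOf (row : List (String × String)) : String :=
  PySem.Str.upper (((PySem.Dict.mk row).get? "Category").getD "")

-- ===== PORT A =====
def spend_on_count (the_list : List (List (String × String))) : List (String × Int) :=
  let st : Int × Int × Int × Int × Int × Int × Int :=
    the_list.foldl (fun c row =>
      let cat := pvCatOf row
      if cat = "FOOD" then (c.1 + 1, c.2.1, c.2.2.1, c.2.2.2.1, c.2.2.2.2.1, c.2.2.2.2.2.1, c.2.2.2.2.2.2)
      else if cat = "TRANSPORT" then (c.1, c.2.1 + 1, c.2.2.1, c.2.2.2.1, c.2.2.2.2.1, c.2.2.2.2.2.1, c.2.2.2.2.2.2)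
      else if cat = "ENTERTAINMENT" then (c.1, c.2.1, c.2.2.1 + 1, c.2.2.2.1, c.2.2.2.2.1, c.2.2.2.2.2.1, c.2.2.2.2.2.2)
      else if cat = "SHOPPING" then (c.1, c.2.1, c.2.2.1, c.2.2.2.1 + 1, c.2.2.2.2.1, c.2.2.2.2.2.1, c.2.2.2.2.2.2)
      else if cat = "HEALTH" then (c.1, c.2.1, c.2.2.1, c.2.2.2.1, c.2.2.2.2.1 + 1, c.2.2.2.2.2.1, c.2.2.2.2.2.2)
      else if cat = "UTILITIES" then (c.1, c.2.1, c.2.2.1, c.2.2.2.1, c.2.2.2.2.1, c.2.2.2.2.2.1 + 1, c.2.2.2.2.2.2)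
      else if cat = "SOFTWARE" then (c.1, c.2.1, c.2.2.1, c.2.2.2.1, c.2.2.2.2.1, c.2.2.2.2.2.1, c.2.2.2.2.2.2 + 1)
      else c)
      ((0 : Int), (0 : Int), (0 : Int), (0 : Int), (0 : Int), (0 : Int), (0 : Int))
  let result : List (String × Int) :=
    [("Food", st.1), ("Transport", st.2.1), ("Entertainment", st.2.2.1),
     ("Shopping", st.2.2.2.1), ("Health", st.2.2.2.2.1),
     ("Utilities", st.2.2.2.2.2.1), ("Software", st.2.2.2.2.2.2)]
  PySem.List.sorted result (fun x => x.2) true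

-- ===== PORT B =====
def spend_on_count_alt (the_list : List (List (String × String))) : List (String × Int) :=
  let cats : List (String × String) :=
    [("Food", "FOOD"), ("Transport", "TRANSPORT"), ("Entertainment", "ENTERTAINMENT"),
     ("Shopping", "SHOPPING"), ("Health", "HEALTH"), ("Utilities", "UTILITIES"),
     ("Software", "SOFTWARE")]
  let result : List (String × Int) :=
    cats.map (fun nk => (nk.1, ((the_list.filter (fun row => pvCatOf row = nk.2)).length : Int)))
  PySem.List.sorted result (fun x => x.2) true

-- ===== PRECONDITION & SPEC =====
-- Pre_ excludes exactly the rows without a 'Category' key, on which Python A raises KeyError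
def Pre_spend_on_count (the_list : List (List (String × String))) : Prop :=
  ∀ row ∈ the_list, ((PySem.Dict.mk row).get? "Category").isSome
instance (the_list : List (List (String × String))) : Decidable (Pre_spend_on_count the_list) := by unfold Pre_spend_on_count; infer_instance

def pvWitness_spend_on_count : (List (List (String × String))) :=
  [[("Category", "food"), ("Amount", "3")], [("Category", "HEALTH")]]

def Spec_spend_on_count (the_list : List (List (String × String))) (out : List (String × Int)) : Prop := out = spend_on_count_alt the_list
instance (the_list : List (List (String × String))) (out : List (String × Int)) : Decidable (Spec_spend_on_count the_list out) := by unfold Spec_spend_on_count; infer_instance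

-- ===== CLAIM (what is proved, stated in full; the proofs are below) =====
def Claim_equal_spend_on_count : Prop := ∀ (the_list : List (List (String × String))), Dom_spend_on_count the_list → Pre_spend_on_count the_list → Spec_spend_on_count the_list (spend_on_count the_list)

-- ===== LEMMAS AND PROOFS =====

-- count of rows whose uppercased category equals k
def pvCnt (k : String) (l : List (List (String × String))) : Int :=
  ((l.filter (fun row => pvCatOf row = k)).length : Int)

theorem pvCnt_cons (k : String) (r : List (String × String)) (l : List (List (String × String))) :
    pvCnt k (r :: l) = (if pvCatOf r = k then 1 else 0) + pvCnt k l := by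
  simp only [pvCnt, List.filter]
  split_ifs with h <;> simp_all <;> omega

-- A's if/elif step, rewritten as seven independent indicator increments (at most one fires)
theorem stepEq (c : Int × Int × Int × Int × Int × Int × Int) (r : List (String × String)) :
    (if pvCatOf r = "FOOD" then (c.1 + 1, c.2.1, c.2.2.1, c.2.2.2.1, c.2.2.2.2.1, c.2.2.2.2.2.1, c.2.2.2.2.2.2)
      else if pvCatOf r = "TRANSPORT" then (c.1, c.2.1 + 1, c.2.2.1, c.2.2.2.1, c.2.2.2.2.1, c.2.2.2.2.2.1, c.2.2.2.2.2.2)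
      else if pvCatOf r = "ENTERTAINMENT" then (c.1, c.2.1, c.2.2.1 + 1, c.2.2.2.1, c.2.2.2.2.1, c.2.2.2.2.2.1, c.2.2.2.2.2.2)
      else if pvCatOf r = "SHOPPING" then (c.1, c.2.1, c.2.2.1, c.2.2.2.1 + 1, c.2.2.2.2.1, c.2.2.2.2.2.1, c.2.2.2.2.2.2)
      else if pvCatOf r = "HEALTH" then (c.1, c.2.1, c.2.2.1, c.2.2.2.1, c.2.2.2.2.1 + 1, c.2.2.2.2.2.1, c.2.2.2.2.2.2)
      else if pvCatOf r = "UTILITIES" then (c.1, c.2.1, c.2.2.1, c.2.2.2.1, c.2.2.2.2.1, c.2.2.2.2.2.1 + 1, c.2.2.2.2.2.2)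
      else if pvCatOf r = "SOFTWARE" then (c.1, c.2.1, c.2.2.1, c.2.2.2.1, c.2.2.2.2.1, c.2.2.2.2.2.1, c.2.2.2.2.2.2 + 1)
      else c)
    = (c.1 + (if pvCatOf r = "FOOD" then 1 else 0),
       c.2.1 + (if pvCatOf r = "TRANSPORT" then 1 else 0),
       c.2.2.1 + (if pvCatOf r = "ENTERTAINMENT" then 1 else 0),
       c.2.2.2.1 + (if pvCatOf r = "SHOPPING" then 1 else 0),
       c.2.2.2.2.1 + (if pvCatOf r = "HEALTH" then 1 else 0),
       c.2.2.2.2.2.1 + (if pvCatOf r = "UTILITIES" then 1 else 0),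
       c.2.2.2.2.2.2 + (if pvCatOf r = "SOFTWARE" then 1 else 0)) := by
  by_cases h1 : pvCatOf r = "FOOD"
  · simp [h1]
  by_cases h2 : pvCatOf r = "TRANSPORT"
  · simp [h2]
  by_cases h3 : pvCatOf r = "ENTERTAINMENT"
  · simp [h3]
  by_cases h4 : pvCatOf r = "SHOPPING"
  · simp [h4]
  by_cases h5 : pvCatOf r = "HEALTH"
  · simp [h5]
  by_cases h6 : pvCatOf r = "UTILITIES"
  · simp [h6]
  by_cases h7 : pvCatOf r = "SOFTWARE"
  · simp [h7]
  · simp [h1, h2, h3, h4, h5, h6, h7]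

-- the fold in port A accumulates exactly the seven filter-counts
theorem foldA_eq (l : List (List (String × String)))
    (c : Int × Int × Int × Int × Int × Int × Int) :
    l.foldl (fun c row =>
      let cat := pvCatOf row
      if cat = "FOOD" then (c.1 + 1, c.2.1, c.2.2.1, c.2.2.2.1, c.2.2.2.2.1, c.2.2.2.2.2.1, c.2.2.2.2.2.2)
      else if cat = "TRANSPORT" then (c.1, c.2.1 + 1, c.2.2.1, c.2.2.2.1, c.2.2.2.2.1, c.2.2.2.2.2.1, c.2.2.2.2.2.2)
      else if cat = "ENTERTAINMENT" then (c.1, c.2.1, c.2.2.1 + 1, c.2.2.2.1, c.2.2.2.2.1, c.2.2.2.2.2.1, c.2.2.2.2.2.2)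
      else if cat = "SHOPPING" then (c.1, c.2.1, c.2.2.1, c.2.2.2.1 + 1, c.2.2.2.2.1, c.2.2.2.2.2.1, c.2.2.2.2.2.2)
      else if cat = "HEALTH" then (c.1, c.2.1, c.2.2.1, c.2.2.2.1, c.2.2.2.2.1 + 1, c.2.2.2.2.2.1, c.2.2.2.2.2.2)
      else if cat = "UTILITIES" then (c.1, c.2.1, c.2.2.1, c.2.2.2.1, c.2.2.2.2.1, c.2.2.2.2.2.1 + 1, c.2.2.2.2.2.2)
      else if cat = "SOFTWARE" then (c.1, c.2.1, c.2.2.1, c.2.2.2.1, c.2.2.2.2.1, c.2.2.2.2.2.1, c.2.2.2.2.2.2 + 1)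
      else c) c
    = (c.1 + pvCnt "FOOD" l, c.2.1 + pvCnt "TRANSPORT" l, c.2.2.1 + pvCnt "ENTERTAINMENT" l,
       c.2.2.2.1 + pvCnt "SHOPPING" l, c.2.2.2.2.1 + pvCnt "HEALTH" l,
       c.2.2.2.2.2.1 + pvCnt "UTILITIES" l, c.2.2.2.2.2.2 + pvCnt "SOFTWARE" l) := by
  induction l generalizing c with
  | nil => simp [pvCnt]
  | cons r t ih =>
    simp only [List.foldl_cons]
    rw [stepEq]
    rw [ih]
    simp only [pvCnt_cons]
    refine Prod.ext ?_ (Prod.ext ?_ (Prod.ext ?_ (Prod.ext ?_ (Prod.ext ?_ (Prod.ext ?_ ?_))))) <;>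
      dsimp only <;> ring

-- ===== VERDICT (by name: the statement is the Claim_ definition above) =====
theorem spend_on_count_spec : Claim_equal_spend_on_count := by
  intro l _ _
  show spend_on_count l = spend_on_count_alt l
  unfold spend_on_count spend_on_count_alt
  rw [foldA_eq]
  simp [pvCnt]
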